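-- pv_equiv track=rewrite | github.com/jbreizh/actimaths | src/actimaths/exercices_actimaths/cinquieme_geometrie_triangle.py | tex_mesure_angle
-- ===== SOURCE A (Python) =====
-- def tex_mesure_angle(mesure, choix):
--     tex_mesure_enonce = []
--     tex_mesure_corrige = []
--     for i in range(len(mesure)):
--         if i == choix[2]:
--             tex_mesure_enonce.append("?^\\circ")
--             tex_mesure_corrige.append("\\boxed{%s^\\circ}" % mesure[i])
--         else:
--             tex_mesure_enonce.append("%s^\\circ" % mesure[i])
--             tex_mesure_corrige.append("%s^\\circ" % mesure[i])
--     return tex_mesure_enonce, tex_mesure_corrige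
-- ===== SOURCE B (Python) =====
-- def tex_mesure_angle(mesure, choix):
--     # Splits the list at choix[2] instead of testing every index:
--     # format the prefix and suffix uniformly, place the two special
--     # strings in the middle; no per-element branch at all.
--     def fmt(ms):
--         return ["%s^\\circ" % m for m in ms]
--     c = choix[2]
--     if not (0 <= c < len(mesure)):
--         return fmt(mesure), fmt(mesure)
--     pre, post = fmt(mesure[:c]), fmt(mesure[c + 1:])
--     return (pre + ["?^\\circ"] + post,
--             pre + ["\\boxed{%s^\\circ}" % mesure[c]] + post)
-- ===== Notes on version B (the rewrite author's own statement) =====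
-- stated objective: alternative
-- what changed: Instead of one loop that compares every index against choix[2], B splits the list at choix[2] (slices), formats prefix and suffix uniformly and concatenates the two special middle strings; the per-element comparison disappears.
-- outside the precondition, e.g. on tex_mesure_angle([], []): A returns ([], []), B raises IndexError
import Mathlib
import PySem

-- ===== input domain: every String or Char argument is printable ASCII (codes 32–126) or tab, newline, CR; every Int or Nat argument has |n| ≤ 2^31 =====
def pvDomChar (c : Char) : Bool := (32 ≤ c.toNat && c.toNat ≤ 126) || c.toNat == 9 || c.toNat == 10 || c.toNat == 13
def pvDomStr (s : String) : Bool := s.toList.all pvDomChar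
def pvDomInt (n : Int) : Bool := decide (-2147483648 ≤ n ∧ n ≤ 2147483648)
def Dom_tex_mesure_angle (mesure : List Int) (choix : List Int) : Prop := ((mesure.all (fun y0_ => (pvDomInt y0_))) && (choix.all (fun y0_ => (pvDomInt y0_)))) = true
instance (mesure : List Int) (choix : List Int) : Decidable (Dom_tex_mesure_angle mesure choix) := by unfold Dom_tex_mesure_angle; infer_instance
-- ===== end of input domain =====

-- B replaces A's per-index comparison loop by slicing the list at choix[2] and concatenating
-- three segments ('alternative', same cost); equivalence of return values is proved under Pre_.

-- ===== PORT A =====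
def tex_mesure_angle (mesure : List Int) (choix : List Int) : List String × List String :=
  -- A reads choix[2] each iteration; Pre_ guarantees it exists, so we bind it once (default irrelevant under Pre_)
  let c : Int := PySem.List.pyGetD choix 2 0
  (List.range mesure.length).foldl
    (fun (acc : List String × List String) i =>
      let m := PySem.Int.toStr (mesure.getD i 0)
      if (i : Int) = c then
        (acc.1 ++ ["?^\\circ"], acc.2 ++ ["\\boxed{" ++ m ++ "^\\circ}"])
      else
        (acc.1 ++ [m ++ "^\\circ"], acc.2 ++ [m ++ "^\\circ"]))
    ([], [])

-- ===== PORT B =====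
-- helper fmt of Source B
def fmtCirc (ms : List Int) : List String := ms.map (fun m => PySem.Int.toStr m ++ "^\\circ")

def tex_mesure_angle_alt (mesure : List Int) (choix : List Int) : List String × List String :=
  let c : Int := PySem.List.pyGetD choix 2 0
  if ¬ (0 ≤ c ∧ c < (mesure.length : Int)) then
    (fmtCirc mesure, fmtCirc mesure)
  else
    let pre := fmtCirc (PySem.List.slice mesure none (some c))
    let post := fmtCirc (PySem.List.slice mesure (some (c + 1)) none)
    -- mesure[c]: in range by the guard, so getD is exact here
    (pre ++ ["?^\\circ"] ++ post,
     pre ++ ["\\boxed{" ++ PySem.Int.toStr (mesure.getD c.toNat 0) ++ "^\\circ}"] ++ post)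

-- ===== PRECONDITION & SPEC =====
-- Pre_ requires choix to have at least 3 elements: A raises IndexError reading choix[2] whenever mesure is non-empty, and B reads choix[2] unconditionally, so on empty mesure with short choix A returns ([], []) while B raises.
def Pre_tex_mesure_angle (mesure : List Int) (choix : List Int) : Prop := 3 ≤ choix.length
instance (mesure : List Int) (choix : List Int) : Decidable (Pre_tex_mesure_angle mesure choix) := by unfold Pre_tex_mesure_angle; infer_instance
def pvWitness_tex_mesure_angle : List Int × List Int := ([60, 70, 50], [0, 1, 1])
def Spec_tex_mesure_angle (mesure : List Int) (choix : List Int) (out : List String × List String) : Prop := out = tex_mesure_angle_alt mesure choix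
instance (mesure : List Int) (choix : List Int) (out : List String × List String) : Decidable (Spec_tex_mesure_angle mesure choix out) := by unfold Spec_tex_mesure_angle; infer_instance

-- ===== CLAIM (what is proved, stated in full; the proofs are below) =====
def Claim_equal_tex_mesure_angle : Prop := ∀ (mesure : List Int) (choix : List Int), Dom_tex_mesure_angle mesure choix → Pre_tex_mesure_angle mesure choix → Spec_tex_mesure_angle mesure choix (tex_mesure_angle mesure choix)

-- ===== LEMMAS AND PROOFS =====

-- A's fold yields the two maps over range, with the branch applied pointwise.
theorem foldA_eq_map (c : Int) (s : Nat → String) (n : Nat) :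
    (List.range n).foldl
      (fun (acc : List String × List String) (i : Nat) =>
        if (i : Int) = c then
          (acc.1 ++ ["?^\\circ"], acc.2 ++ ["\\boxed{" ++ s i ++ "^\\circ}"])
        else
          (acc.1 ++ [s i ++ "^\\circ"], acc.2 ++ [s i ++ "^\\circ"]))
      ([], []) =
    ((List.range n).map (fun (i : Nat) => if (i : Int) = c then "?^\\circ" else s i ++ "^\\circ"),
     (List.range n).map (fun (i : Nat) => if (i : Int) = c then "\\boxed{" ++ s i ++ "^\\circ}" else s i ++ "^\\circ")) := by
  induction n with
  | zero => simp
  | succ n ih =>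
    rw [List.range_succ, List.foldl_append, ih, List.map_append, List.map_append]
    by_cases h : (n : Int) = c <;> simp [h]

-- Mapping an "if i = c" branch over range n equals the plain map with index c overwritten.
theorem map_range_if_eq_set (n : Nat) (c : Int) (h0 : 0 ≤ c) (hk : c.toNat < n)
    (f g : Nat → String) :
    (List.range n).map (fun (i : Nat) => if (i : Int) = c then g i else f i) =
    ((List.range n).map f).set c.toNat (g c.toNat) := by
  apply List.ext_getElem
  · simp
  · intro j h1 h2
    simp only [List.getElem_map, List.getElem_range, List.getElem_set]
    by_cases hj : j = c.toNat
    · have : (j : Int) = c := by omega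
      simp [hj]
      intro hlt
      omega
    · have hji : ¬ ((j : Int) = c) := by omega
      have hkj : ¬ (c.toNat = j) := fun h => hj h.symm
      simp [hji, hkj]

-- When c matches no index, the branch never fires.
theorem map_range_if_none (n : Nat) (c : Int) (hc : ¬ (0 ≤ c ∧ c < (n : Int)))
    (f g : Nat → String) :
    (List.range n).map (fun (i : Nat) => if (i : Int) = c then g i else f i) =
    (List.range n).map f := by
  apply List.map_congr_left
  intro i hi
  have hi' : i < n := List.mem_range.mp hi
  have : ¬ ((i : Int) = c) := by
    intro h; apply hc; constructor <;> omega
  simp [this]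

theorem map_range_getD (mesure : List Int) :
    (List.range mesure.length).map (fun i => PySem.Int.toStr (mesure.getD i 0) ++ "^\\circ") =
    fmtCirc mesure := by
  unfold fmtCirc
  apply List.ext_getElem
  · simp
  · intro j h1 h2
    simp only [List.getElem_map, List.getElem_range]
    rw [List.getD_eq_getElem?_getD, List.getElem?_eq_getElem (by simpa using h1)]
    simp

-- B's three-segment concatenation is the base map with index k overwritten.
theorem fmt_segments_eq_set (mesure : List Int) (c : Int) (h0 : 0 ≤ c)
    (hk : c.toNat < mesure.length) (x : String) :
    fmtCirc (PySem.List.slice mesure none (some c)) ++ [x] ++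
      fmtCirc (PySem.List.slice mesure (some (c + 1)) none) =
    (fmtCirc mesure).set c.toNat x := by
  rw [PySem.List.slice_to (xs := mesure) (b := c) h0, PySem.List.slice_from (xs := mesure) (a := c + 1) (by omega)]
  have hc1 : (c + 1).toNat = c.toNat + 1 := by omega
  unfold fmtCirc
  rw [List.map_take, List.map_drop, hc1,
      List.set_eq_take_append_cons_drop, if_pos (by simpa using hk)]
  simp

-- ===== VERDICT (by name: the statement is the Claim_ definition above) =====
theorem tex_mesure_angle_spec : Claim_equal_tex_mesure_angle := by
  intro mesure choix _ _
  unfold Spec_tex_mesure_angle tex_mesure_angle tex_mesure_angle_alt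
  set c : Int := PySem.List.pyGetD choix 2 0 with hc
  rw [foldA_eq_map c (fun i => PySem.Int.toStr (mesure.getD i 0)) mesure.length]
  by_cases h : 0 ≤ c ∧ c < (mesure.length : Int)
  · rw [if_neg (not_not_intro h)]
    have hk : c.toNat < mesure.length := by omega
    rw [map_range_if_eq_set _ _ h.1 hk, map_range_if_eq_set _ _ h.1 hk, map_range_getD,
        ← fmt_segments_eq_set mesure c h.1 hk, ← fmt_segments_eq_set mesure c h.1 hk]
  · rw [if_pos h, map_range_if_none _ _ h, map_range_if_none _ _ h, map_range_getD]
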